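-- pv_equiv track=rewrite | github.com/ariffaisal05/Description-Metadata-Generator | DescAIV07-Arip/column_descriptions.py | extract_descriptions2
-- ===== SOURCE A (Python) =====
-- def extract_descriptions2(response_text: str, batch_cols: list[str]) -> list[str]:
--     """
--     Extracts descriptions from the response text, ensuring each column is described.
--     If a column is missing in the response, it returns "[MISSING]" for that column.
--     """
--     lines = [line.strip() for line in response_text.strip().split('\n') if ':' in line]
--     desc_map = {}
--     for line in lines:
--         parts = line.split(':', 1)
--         if len(parts) == 2:
--             col_name, desc = parts[0].strip(), parts[1].strip()
--             desc_map[col_name] = desc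
--     return [desc_map.get(col, "[MISSING]") for col in batch_cols]
-- ===== SOURCE B (Python) =====
-- def extract_descriptions2(response_text: str, batch_cols: list[str]) -> list[str]:
--     # Transposed loops: instead of building a name->desc index and looking each
--     # column up, initialize the output to [MISSING] and let each parsed line
--     # (found via find/slicing) overwrite the slots of matching columns, so
--     # later lines naturally win.
--     pairs = []
--     for line in response_text.strip().split('\n'):
--         s = line.strip()
--         i = s.find(':')
--         if i != -1:
--             pairs.append((s[:i].strip(), s[i + 1:].strip()))
--     result = ["[MISSING]" for _ in batch_cols]
--     for name, desc in pairs: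
--         result = [desc if c == name else v for c, v in zip(batch_cols, result)]
--     return result
-- ===== Notes on version B (the rewrite author's own statement) =====
-- stated objective: alternative
-- what changed: B transposes the loops: instead of building a name->desc dict and looking up each column, it parses lines by find/slicing and starts from an all-[MISSING] output list which each parsed line overwrites at the matching column slots, so later duplicate lines naturally win.
import Mathlib
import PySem

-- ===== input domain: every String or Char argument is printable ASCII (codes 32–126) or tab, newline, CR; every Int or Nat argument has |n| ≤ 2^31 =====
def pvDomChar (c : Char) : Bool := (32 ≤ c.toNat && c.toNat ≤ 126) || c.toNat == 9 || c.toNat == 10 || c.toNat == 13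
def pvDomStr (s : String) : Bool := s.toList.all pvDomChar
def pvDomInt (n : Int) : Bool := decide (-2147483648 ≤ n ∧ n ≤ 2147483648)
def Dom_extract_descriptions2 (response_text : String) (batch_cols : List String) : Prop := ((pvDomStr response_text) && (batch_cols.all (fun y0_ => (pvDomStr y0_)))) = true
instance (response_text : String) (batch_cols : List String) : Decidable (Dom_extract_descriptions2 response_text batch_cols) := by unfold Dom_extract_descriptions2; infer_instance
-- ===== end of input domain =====

-- B transposes the loops: lines are parsed by find/slicing and each parsed line overwrites the
-- matching slots of an output list initialized to "[MISSING]" (alternative decomposition, not faster).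

-- ===== PORT A =====
def extract_descriptions2 (response_text : String) (batch_cols : List String) : List String :=
  let lines := (((PySem.Str.split? (PySem.Str.strip response_text) "\n").getD []).filter
      (fun line => PySem.Str.isIn ":" line)).map (fun line => PySem.Str.strip line)
  let desc_map := lines.foldl (fun d line =>
      let parts := (PySem.Str.splitMax? line ":" 1).getD []
      if parts.length = 2 then
        d.insert (PySem.Str.strip (PySem.List.pyGetD parts 0 ""))
                 (PySem.Str.strip (PySem.List.pyGetD parts 1 ""))
      else d) (PySem.Dict.empty : PySem.Dict String String)
  batch_cols.map (fun col => desc_map.getD col "[MISSING]")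

-- ===== PORT B =====
def extract_descriptions2_alt (response_text : String) (batch_cols : List String) : List String :=
  let pairs := ((PySem.Str.split? (PySem.Str.strip response_text) "\n").getD []).foldl
      (fun acc line =>
        let s := PySem.Str.strip line
        let i := PySem.Str.find s ":"
        if i ≠ -1 then
          acc ++ [(PySem.Str.strip (PySem.Str.slice s none (some i)),
                   PySem.Str.strip (PySem.Str.slice s (some (i + 1)) none))]
        else acc) []
  pairs.foldl (fun result p =>
      (batch_cols.zip result).map (fun cv => if cv.1 == p.1 then p.2 else cv.2))
    (batch_cols.map (fun _ => "[MISSING]"))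

-- ===== PRECONDITION & SPEC =====
def Spec_extract_descriptions2 (response_text : String) (batch_cols : List String) (out : List String) : Prop := out = extract_descriptions2_alt response_text batch_cols
instance (response_text : String) (batch_cols : List String) (out : List String) : Decidable (Spec_extract_descriptions2 response_text batch_cols out) := by unfold Spec_extract_descriptions2; infer_instance

-- ===== CLAIM (what is proved, stated in full; the proofs are below) =====
def Claim_equal_extract_descriptions2 : Prop := ∀ (response_text : String) (batch_cols : List String), Dom_extract_descriptions2 response_text batch_cols → Spec_extract_descriptions2 response_text batch_cols (extract_descriptions2 response_text batch_cols)

-- ===== LEMMAS AND PROOFS =====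

lemma mem_dropWhile_isspace (l : List Char) :
    ':' ∈ l.dropWhile PySem.Chars.isspace ↔ ':' ∈ l := by
  induction l with
  | nil => simp
  | cons a t ih =>
    by_cases ha : PySem.Chars.isspace a = true
    · have hne : a ≠ ':' := by rintro rfl; simp [PySem.Chars.isspace] at ha
      simp [List.dropWhile_cons, ha, ih, hne, Ne.symm hne]
    · simp [List.dropWhile_cons, ha]

lemma mem_strip (l : List Char) : ':' ∈ PySem.Chars.strip l ↔ ':' ∈ l := by
  simp [PySem.Chars.strip, PySem.Chars.rstrip, PySem.Chars.lstrip, mem_dropWhile_isspace]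

lemma find_go_singleton (l : List Char) (k : ℕ) :
    PySem.Chars.find.go [':'] l k =
      if ':' ∈ l then ((k + List.idxOf ':' l : ℕ) : ℤ) else -1 := by
  induction l generalizing k with
  | nil => simp [PySem.Chars.find.go]
  | cons c t ih =>
    by_cases hc : c = ':'
    · subst hc
      simp [PySem.Chars.find.go, List.isPrefixOf, List.idxOf_cons]
    · have h1 : ([':'].isPrefixOf (c :: t)) = false := by
        simp [List.isPrefixOf, Ne.symm hc]
      rw [PySem.Chars.find.go]
      simp only [h1]
      rw [ih]
      by_cases hm : ':' ∈ t
      · simp [hm, hc, List.idxOf_cons, Ne.symm hc]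
        push_cast; ring
      · simp [hm, hc, Ne.symm hc]

lemma find_singleton (l : List Char) :
    PySem.Chars.find l [':'] = if ':' ∈ l then (List.idxOf ':' l : ℤ) else -1 := by
  rw [PySem.Chars.find, find_go_singleton]; simp

lemma go_zero (fuel : ℕ) (l cur : List Char) (acc : List (List Char)) :
    PySem.Chars.splitOnMax.go [':'] fuel 0 l cur acc = ((cur.reverse ++ l) :: acc).reverse := by
  cases fuel with
  | zero => rw [PySem.Chars.splitOnMax.go]
  | succ f => cases l with
    | nil => rw [PySem.Chars.splitOnMax.go]; simp; omega
    | cons c t => rw [PySem.Chars.splitOnMax.go]; simp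

lemma go_one (fuel : ℕ) (l cur : List Char) (acc : List (List Char)) (h : l.length < fuel) :
    PySem.Chars.splitOnMax.go [':'] fuel 1 l cur acc =
      if ':' ∈ l then
        (l.drop (List.idxOf ':' l + 1) :: (cur.reverse ++ l.take (List.idxOf ':' l)) :: acc).reverse
      else ((cur.reverse ++ l) :: acc).reverse := by
  induction fuel generalizing l cur acc with
  | zero => omega
  | succ f ih =>
    cases l with
    | nil => rw [PySem.Chars.splitOnMax.go]; simp; omega
    | cons c t =>
      by_cases hc : c = ':'
      · subst hc
        have hp : ([':'].isPrefixOf (':' :: t)) = true := by simp [List.isPrefixOf]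
        rw [PySem.Chars.splitOnMax.go]
        simp only [hp, if_true, if_neg (by omega : ¬ (1:ℕ) = 0)]
        rw [go_zero]
        simp [List.idxOf_cons]
      · have hp : ([':'].isPrefixOf (c :: t)) = false := by simp [List.isPrefixOf, Ne.symm hc]
        rw [PySem.Chars.splitOnMax.go]
        simp only [hp, if_neg (by omega : ¬ (1:ℕ) = 0), Bool.false_eq_true, if_false]
        rw [ih t (c :: cur) acc (by simp at h ⊢; omega)]
        by_cases hm : ':' ∈ t
        · simp [hm, hc, List.idxOf_cons, Ne.symm hc, List.take_succ_cons]
        · simp [hm, hc, Ne.symm hc]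

lemma splitOnMax_singleton (l : List Char) :
    PySem.Chars.splitOnMax l [':'] 1 =
      if ':' ∈ l then [l.take (List.idxOf ':' l), l.drop (List.idxOf ':' l + 1)] else [l] := by
  rw [PySem.Chars.splitOnMax]
  rw [if_neg (by omega : ¬ (1:ℤ) < 0)]
  simp only [Int.toNat_one]
  rw [go_one _ _ _ _ (by omega)]
  by_cases hm : ':' ∈ l <;> simp [hm]

def pvPair (s : String) : String × String :=
  (PySem.Str.strip (PySem.Str.slice s none (some (PySem.Str.find s ":"))),
   PySem.Str.strip (PySem.Str.slice s (some (PySem.Str.find s ":" + 1)) none))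

lemma isIn_colon (line : String) : PySem.Str.isIn ":" line = true ↔ ':' ∈ line.toList := by
  rw [PySem.Str.isIn_eq]
  rw [show (":".toList) = [':'] from by decide]
  rw [PySem.Chars.isIn_iff_infix, List.singleton_infix_iff]

lemma find_strip_neg_one (line : String) :
    PySem.Str.find (PySem.Str.strip line) ":" = -1 ↔ ':' ∉ line.toList := by
  rw [PySem.Str.find_eq, show (":".toList) = [':'] from by decide, find_singleton,
    PySem.Str.toList_strip]
  by_cases hc : ':' ∈ line.toList
  · simp [mem_strip, hc]
  · simp [mem_strip, hc]

lemma step_A_insert (d : PySem.Dict String String) (s : String) (h : ':' ∈ s.toList) :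
    (let parts := (PySem.Str.splitMax? s ":" 1).getD []
     if parts.length = 2 then
       d.insert (PySem.Str.strip (PySem.List.pyGetD parts 0 ""))
                (PySem.Str.strip (PySem.List.pyGetD parts 1 ""))
     else d) = d.insert (pvPair s).1 (pvPair s).2 := by
  have hfind : PySem.Str.find s ":" = (List.idxOf ':' s.toList : ℤ) := by
    rw [PySem.Str.find_eq, show (":".toList) = [':'] from by decide, find_singleton, if_pos h]
  have hsm : PySem.Chars.splitMax? s.toList [':'] 1 =
      some [s.toList.take (List.idxOf ':' s.toList), s.toList.drop (List.idxOf ':' s.toList + 1)] := by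
    rw [PySem.Chars.splitMax?]
    simp [splitOnMax_singleton, h]
  have hmap := PySem.Str.splitMax?_map s ":" 1
  rw [show (":".toList) = [':'] from by decide, hsm] at hmap
  cases hps : PySem.Str.splitMax? s ":" 1 with
  | none => rw [hps] at hmap; simp at hmap
  | some ps =>
    rw [hps] at hmap
    simp only [Option.map_some, Option.some_inj] at hmap
    cases ps with
    | nil => simp at hmap
    | cons p0 rest =>
      cases rest with
      | nil => simp at hmap
      | cons p1 rest2 =>
        cases rest2 with
        | cons p2 r3 => simp at hmap
        | nil =>
          simp only [List.map_cons, List.map_nil, List.cons.injEq, and_true] at hmap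
          obtain ⟨h0, h1⟩ := hmap
          have e0 : PySem.List.pyGetD [p0, p1] 0 "" = p0 := by simp [PySem.List.pyGetD]
          have e1 : PySem.List.pyGetD [p0, p1] 1 "" = p1 := by simp [PySem.List.pyGetD]
          have t0 : p0.toList = (PySem.Str.slice s none (some (PySem.Str.find s ":"))).toList := by
            rw [PySem.Str.toList_slice, PySem.Chars.slice_eq_listSlice, hfind,
              PySem.List.slice_to _ (by positivity), Int.toNat_natCast, h0]
          have t1 : p1.toList = (PySem.Str.slice s (some (PySem.Str.find s ":" + 1)) none).toList := by
            rw [PySem.Str.toList_slice, PySem.Chars.slice_eq_listSlice, hfind,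
              PySem.List.slice_from _ (by positivity),
              show ((List.idxOf ':' s.toList : ℤ) + 1).toNat = List.idxOf ':' s.toList + 1 from by omega, h1]
          have k0 : PySem.Str.strip p0 = (pvPair s).1 := by
            simp only [pvPair, PySem.Str.strip, t0]
          have k1 : PySem.Str.strip p1 = (pvPair s).2 := by
            simp only [pvPair, PySem.Str.strip, t1]
          simp only [hps, Option.getD_some, e0, e1, k0, k1]
          norm_num

lemma getD_foldl_insert (pairs : List (String × String)) (d : PySem.Dict String String)
    (col dflt : String) :
    (pairs.foldl (fun d p => d.insert p.1 p.2) d).getD col dflt =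
      pairs.foldl (fun v p => if p.1 == col then p.2 else v) (d.getD col dflt) := by
  induction pairs generalizing d with
  | nil => rfl
  | cons p t ih =>
    simp only [List.foldl_cons]
    rw [ih]
    congr 1
    by_cases hp : p.1 = col
    · subst hp; rw [PySem.Dict.getD_insert_self]; simp
    · rw [PySem.Dict.getD_insert_of_ne _ _ _ (Ne.symm hp)]
      simp [hp]

lemma foldB_eq (raw : List String) (acc : List (String × String)) :
    raw.foldl (fun acc line =>
        let s := PySem.Str.strip line
        let i := PySem.Str.find s ":"
        if i ≠ -1 then
          acc ++ [(PySem.Str.strip (PySem.Str.slice s none (some i)),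
                   PySem.Str.strip (PySem.Str.slice s (some (i + 1)) none))]
        else acc) acc =
      acc ++ ((raw.filter (fun line => PySem.Str.isIn ":" line)).map
        (fun line => pvPair (PySem.Str.strip line))) := by
  induction raw generalizing acc with
  | nil => simp
  | cons line rest ih =>
    simp only [List.foldl_cons, List.filter_cons]
    by_cases hc : ':' ∈ line.toList
    · have hne : ¬ (PySem.Str.find (PySem.Str.strip line) ":" = -1) := by
        rw [find_strip_neg_one]; simp [hc]
      rw [if_pos hne, ih, if_pos ((isIn_colon line).mpr hc)]
      simp [pvPair]
    · have heq : PySem.Str.find (PySem.Str.strip line) ":" = -1 := (find_strip_neg_one line).mpr hc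
      have hA : ¬ (PySem.Str.isIn ":" line = true) := fun hh => hc ((isIn_colon line).mp hh)
      have heq' : PySem.Chars.find (PySem.Chars.strip line.toList) [':'] = -1 := by
        rw [PySem.Str.find_eq, PySem.Str.toList_strip,
          show (":".toList) = [':'] from by decide] at heq
        exact heq
      rw [if_neg (by simp [heq']), ih, if_neg hA]

lemma foldA_eq (raw : List String) (d : PySem.Dict String String) :
    raw.foldl (fun d line =>
        if PySem.Str.isIn ":" line = true then
          (let parts := (PySem.Str.splitMax? (PySem.Str.strip line) ":" 1).getD []
           if parts.length = 2 then
             d.insert (PySem.Str.strip (PySem.List.pyGetD parts 0 ""))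
                      (PySem.Str.strip (PySem.List.pyGetD parts 1 ""))
           else d)
        else d) d =
      ((raw.filter (fun line => PySem.Str.isIn ":" line)).map
        (fun line => pvPair (PySem.Str.strip line))).foldl (fun d p => d.insert p.1 p.2) d := by
  induction raw generalizing d with
  | nil => rfl
  | cons line rest ih =>
    simp only [List.foldl_cons, List.filter_cons]
    by_cases hc : ':' ∈ line.toList
    · have hA := (isIn_colon line).mpr hc
      rw [if_pos hA, if_pos hA]
      rw [step_A_insert _ _ (by rw [PySem.Str.toList_strip, mem_strip]; exact hc)]
      simp only [List.map_cons, List.foldl_cons]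
      exact ih _
    · have hA : ¬ (PySem.Str.isIn ":" line = true) := fun hh => hc ((isIn_colon line).mp hh)
      rw [if_neg hA, if_neg hA]
      exact ih d

lemma zip_map_self {α β γ : Type} (cols : List α) (g : α → β) (f : α → β → γ) :
    (cols.zip (cols.map g)).map (fun cv => f cv.1 cv.2) = cols.map (fun c => f c (g c)) := by
  induction cols with
  | nil => simp
  | cons c t ih => simp [ih]

lemma foldB_map (pairs : List (String × String)) (cols : List String) (g : String → String) :
    pairs.foldl (fun result p =>
        (cols.zip result).map (fun cv => if cv.1 == p.1 then p.2 else cv.2)) (cols.map g) =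
      cols.map (fun c => pairs.foldl (fun v p => if p.1 == c then p.2 else v) (g c)) := by
  induction pairs generalizing g with
  | nil => simp
  | cons p t ih =>
    simp only [List.foldl_cons]
    rw [zip_map_self cols g (fun c v => if c == p.1 then p.2 else v), ih]
    refine List.map_congr_left ?_
    intro c _
    congr 1
    by_cases h : p.1 = c
    · simp [h]
    · simp [h, Ne.symm h]

-- ===== VERDICT (by name: the statement is the Claim_ definition above) =====
theorem extract_descriptions2_spec : Claim_equal_extract_descriptions2 := by
  intro response_text batch_cols _
  unfold Spec_extract_descriptions2
  unfold extract_descriptions2 extract_descriptions2_alt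
  simp only [List.foldl_map, List.foldl_filter]
  rw [foldA_eq, foldB_eq]
  simp only [List.nil_append]
  rw [foldB_map]
  refine List.map_congr_left ?_
  intro col _
  rw [getD_foldl_insert]
  congr 1
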